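-- pv_equiv track=rewrite | github.com/facebookresearch/CMR | semanticdebugger/benchmark_gen/para_stream.py | get_duplicate_ids
-- ===== SOURCE A (Python) =====
-- def get_duplicate_ids(data_stream):
--     seen_ids = set()
--     examples_to_paraphrase = {}
--     for episode in data_stream:
--         for item in episode:
--             if item["id"] not in seen_ids:
--                 seen_ids.add(item["id"])
--             else:
--                 examples_to_paraphrase[item["id"]] = item
--     return examples_to_paraphrase
-- ===== SOURCE B (Python) =====
-- def get_duplicate_ids(data_stream):
--     # Declarative two-stage version: characterize duplicate ids as the ids whose
--     # prefix of the flattened stream contains exactly one earlier occurrence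
--     # (i.e. this is the id's second occurrence), then fetch each such id's last
--     # item by searching the stream from the back.
--     items = [it for ep in data_stream for it in ep]
--     ids = [it["id"] for it in items]
--     dup_ids = [k for i, k in enumerate(ids) if ids[:i].count(k) == 1]
--     return {k: next(it for it in reversed(items) if it["id"] == k)
--             for k in dup_ids}
-- ===== Notes on version B (the rewrite author's own statement) =====
-- stated objective: alternative
-- what changed: B is a declarative two-stage quadratic version with no mutable seen-set/dict during the scan: it flattens the stream, selects as duplicate ids exactly the positions whose prefix counts one earlier occurrence of the same id, and builds the result by searching the stream from the back for each such id's last item, whereas A maintains a seen-set and conditionally inserts into a dict inside the nested loops.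
import Mathlib
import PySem

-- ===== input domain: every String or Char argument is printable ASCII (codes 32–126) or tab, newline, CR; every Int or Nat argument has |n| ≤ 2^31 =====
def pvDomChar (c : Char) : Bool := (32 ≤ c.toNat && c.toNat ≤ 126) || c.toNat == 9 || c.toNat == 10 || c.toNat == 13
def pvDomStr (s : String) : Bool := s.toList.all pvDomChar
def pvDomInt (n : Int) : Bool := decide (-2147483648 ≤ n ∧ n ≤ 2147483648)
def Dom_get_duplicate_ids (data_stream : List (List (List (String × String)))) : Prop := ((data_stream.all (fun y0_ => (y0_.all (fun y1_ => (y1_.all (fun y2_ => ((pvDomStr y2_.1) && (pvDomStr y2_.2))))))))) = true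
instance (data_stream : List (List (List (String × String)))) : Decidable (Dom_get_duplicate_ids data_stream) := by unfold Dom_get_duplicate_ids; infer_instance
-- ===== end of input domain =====

-- B replaces A's stateful seen-set scan by a declarative two-stage version: select the ids whose
-- stream prefix counts exactly one earlier occurrence, then fetch each id's last item by a
-- backwards search (objective: alternative algorithm, quadratic instead of A's expected-linear).

-- item["id"]: first-match lookup in the item dict; total form used under Pre_ (id key present)
def pvItemId (item : List (String × String)) : String :=
  ((PySem.Dict.mk item).get? "id").getD ""

-- ===== PORT A =====
def pvStepA (st : PySem.Set String × PySem.Dict String (List (String × String)))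
    (item : List (String × String)) :
    PySem.Set String × PySem.Dict String (List (String × String)) :=
  if (PySem.Set.contains st.1 (pvItemId item)) then
    (st.1, st.2.insert (pvItemId item) item)
  else
    (PySem.Set.add st.1 (pvItemId item), st.2)

def get_duplicate_ids (data_stream : List (List (List (String × String)))) :
    List (String × List (String × String)) :=
  (data_stream.foldl (fun st episode => episode.foldl pvStepA st)
    (PySem.Set.empty, PySem.Dict.empty)).2.items

-- ===== PORT B =====
-- next(it for it in reversed(items) if it["id"] == k) → find? on the reversed list; the getD []
-- default is never reached for k drawn from dup_ids (k occurs in items), matching Python exactly there.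
def get_duplicate_ids_alt (data_stream : List (List (List (String × String)))) :
    List (String × List (String × String)) :=
  let items := data_stream.flatMap id
  let ids := items.map pvItemId
  let dupIds := (PySem.List.enumerate ids).filterMap
      (fun p => if PySem.List.count (PySem.List.slice ids none (some p.1)) p.2 == 1
                then some p.2 else none)
  (dupIds.foldl (fun d k =>
      d.insert k ((items.reverse.find? (fun it => pvItemId it == k)).getD []))
    PySem.Dict.empty).items

-- ===== PRECONDITION & SPEC =====
-- Pre_ excludes exactly the inputs where A raises KeyError: an item without an "id" key.
def Pre_get_duplicate_ids (data_stream : List (List (List (String × String)))) : Prop :=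
  ∀ episode ∈ data_stream, ∀ item ∈ episode, (PySem.Dict.mk item).contains "id" = true
instance (data_stream : List (List (List (String × String)))) : Decidable (Pre_get_duplicate_ids data_stream) := by unfold Pre_get_duplicate_ids; infer_instance

def pvWitness_get_duplicate_ids : (List (List (List (String × String)))) :=
  [[[("id", "a"), ("x", "1")], [("id", "b")]], [[("id", "a"), ("x", "2")]]]

def Spec_get_duplicate_ids (data_stream : List (List (List (String × String)))) (out : List (String × List (String × String))) : Prop := out = get_duplicate_ids_alt data_stream
instance (data_stream : List (List (List (String × String)))) (out : List (String × List (String × String))) : Decidable (Spec_get_duplicate_ids data_stream out) := by unfold Spec_get_duplicate_ids; infer_instance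

-- ===== CLAIM (what is proved, stated in full; the proofs are below) =====
def Claim_equal_get_duplicate_ids : Prop := ∀ (data_stream : List (List (List (String × String)))), Dom_get_duplicate_ids data_stream → Pre_get_duplicate_ids data_stream → Spec_get_duplicate_ids data_stream (get_duplicate_ids data_stream)

-- ===== LEMMAS AND PROOFS =====

-- the duplicate-id selection of B, as a function of the flattened id list
def pvDup (ids : List String) : List String :=
  (PySem.List.enumerate ids).filterMap
    (fun p => if PySem.List.count (PySem.List.slice ids none (some p.1)) p.2 == 1
              then some p.2 else none)

-- the last item of id k, as B computes it
def pvLast (its : List (List (String × String))) (k : String) : List (String × String) :=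
  (its.reverse.find? (fun it => pvItemId it == k)).getD []

theorem pvLast_append (its : List (List (String × String))) (it : List (String × String)) (k : String) :
    pvLast (its ++ [it]) k = if pvItemId it == k then it else pvLast its k := by
  unfold pvLast
  rw [List.reverse_append, List.reverse_singleton, List.singleton_append, List.find?_cons]
  cases h : (pvItemId it == k) <;> simp [h]

theorem pvDup_append (ids : List String) (k : String) :
    pvDup (ids ++ [k]) = pvDup ids ++ (if ids.count k = 1 then [k] else []) := by
  unfold pvDup
  rw [PySem.List.enumerate_append, List.filterMap_append]
  congr 1
  · apply List.filterMap_congr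
    intro p hp
    obtain ⟨j, hj, rfl⟩ := (PySem.List.mem_enumerate_iff _ _ _).1 hp
    simp only [zero_add]
    rw [PySem.List.slice_to_natCast, PySem.List.slice_to_natCast,
        List.take_append_of_le_length (Nat.le_of_lt hj)]
  · simp only [PySem.List.enumerate, List.zipIdx_cons, List.zipIdx_nil, List.map_cons, List.map_nil,
      List.filterMap_cons, List.filterMap_nil]
    rw [show ((0:Int) + ids.length) = ((ids.length : Nat) : Int) by push_cast [Int.zero_add]; ring]
    rw [PySem.List.slice_to_natCast, List.take_left, PySem.List.count_eq]
    rcases eq_or_ne (ids.count k) 1 with h | h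
    · simp [h]
    · simp [h]

theorem pv_inv (its : List (List (String × String))) :
    (its.foldl pvStepA (PySem.Set.empty, PySem.Dict.empty)).1
        = PySem.Set.ofList (its.map pvItemId)
  ∧ (∀ k, k ∈ pvDup (its.map pvItemId) ↔ 2 ≤ (its.map pvItemId).count k)
  ∧ (pvDup (its.map pvItemId)).Nodup
  ∧ (its.foldl pvStepA (PySem.Set.empty, PySem.Dict.empty)).2.items
      = (pvDup (its.map pvItemId)).map (fun k => (k, pvLast its k)) := by
  induction its using List.reverseRecOn with
  | nil => refine ⟨rfl, ?_, ?_, rfl⟩ <;> simp [pvDup]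
  | append_singleton its it ih =>
    obtain ⟨h1, h3, h4, h5⟩ := ih
    set sA := its.foldl pvStepA (PySem.Set.empty, PySem.Dict.empty) with hsA
    set k := pvItemId it with hk
    set ids := its.map pvItemId with hids
    have hfA : (its ++ [it]).foldl pvStepA (PySem.Set.empty, PySem.Dict.empty) = pvStepA sA it := by
      rw [List.foldl_append]; rfl
    have hmap : (its ++ [it]).map pvItemId = ids ++ [k] := by simp [hids, hk]
    have hcount : ∀ k', (ids ++ [k]).count k' = ids.count k' + (if k' = k then 1 else 0) := by
      intro k'
      simp [List.count_append, List.count_singleton, beq_iff_eq]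
      split <;> simp_all [eq_comm]
    have hcontains : PySem.Set.contains sA.1 k = true ↔ 1 ≤ ids.count k := by
      rw [h1, PySem.Set.contains_iff, PySem.Set.mem_ofList, ← List.count_pos_iff]; omega
    have hknotin : ids.count k < 2 → k ∉ pvDup ids := by
      intro hlt hmem; have := (h3 k).1 hmem; omega
    refine ⟨?_, ?_, ?_, ?_⟩
    · rw [hfA, hmap]
      have hA1 : (pvStepA sA it).1 = PySem.Set.add sA.1 k := by
        unfold pvStepA
        split
        · rename_i hc
          show sA.1 = PySem.Set.add sA.1 k
          rw [PySem.Set.add, if_pos (show PySem.Set.contains sA.1 k = true from hc)]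
        · rfl
      rw [hA1, h1, PySem.Set.ofList_eq_foldl, PySem.Set.ofList_eq_foldl, List.foldl_append]
      rfl
    · intro k'
      rw [hmap, pvDup_append, hcount k']
      rcases eq_or_ne (ids.count k) 1 with hc | hc
      · rw [if_pos hc]
        rw [List.mem_append, List.mem_singleton]
        rcases eq_or_ne k' k with rfl | hkk
        · rw [if_pos rfl]
          constructor
          · intro _; omega
          · intro _; exact Or.inr rfl
        · rw [if_neg hkk]
          have hh := h3 k'
          constructor
          · rintro (hm | rfl)
            · have := hh.1 hm; omega
            · exact absurd rfl hkk
          · intro hle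
            exact Or.inl (hh.2 (by omega))
      · rw [if_neg hc, List.append_nil]
        have hh := h3 k'
        rcases eq_or_ne k' k with rfl | hkk
        · rw [if_pos rfl]
          constructor
          · intro hm; have := hh.1 hm; omega
          · intro hle; exact hh.2 (by omega)
        · rw [if_neg hkk]
          constructor
          · intro hm; have := hh.1 hm; omega
          · intro hle; exact hh.2 (by omega)
    · rw [hmap, pvDup_append]
      rcases eq_or_ne (ids.count k) 1 with hc | hc
      · rw [if_pos hc]
        refine List.Nodup.append h4 (List.nodup_singleton k) ?_
        intro a ha hb
        rw [List.mem_singleton] at hb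
        exact absurd (hb ▸ ha) (hknotin (by omega))
      · rw [if_neg hc, List.append_nil]; exact h4
    · rw [hfA, hmap, pvDup_append]
      have hkeys : sA.2.keys = pvDup ids := by
        show sA.2.items.map Prod.fst = pvDup ids
        rw [h5, List.map_map]
        simp [Function.comp_def]
      have hexcont : sA.2.contains k = true ↔ k ∈ pvDup ids := by
        rw [PySem.Dict.contains_iff_mem_keys, hkeys]
      show (pvStepA sA it).2.items = _
      unfold pvStepA
      rw [← hk]
      rcases Nat.lt_or_ge (ids.count k) 1 with hc0 | hc1
      · -- count 0: id unseen, dict unchanged, no new duplicate id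
        have hns : ¬ PySem.Set.contains sA.1 k = true := by rw [hcontains]; omega
        rw [if_neg hns]
        have : ¬ ids.count k = 1 := by omega
        rw [if_neg this, List.append_nil, h5]
        refine List.map_congr_left ?_
        intro a ha
        have hak : a ≠ k := fun h => absurd (h ▸ ha) (hknotin (by omega))
        rw [pvLast_append]
        have : (pvItemId it == a) = false := by
          rw [← hk]; exact beq_eq_false_iff_ne.2 fun h => hak h.symm
        rw [this]; rfl
      · rw [if_pos (hcontains.2 hc1)]
        rcases eq_or_ne (ids.count k) 1 with hc | hc
        · -- count 1: second occurrence, fresh key appended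
          have hko : k ∉ pvDup ids := hknotin (by omega)
          have hncont : sA.2.contains k = false := by
            rw [← Bool.not_eq_true]; rw [hexcont]; exact hko
          rw [if_pos hc]
          show (sA.2.insert k it).items = _
          rw [PySem.Dict.items_insert_of_not_contains _ _ hncont, h5, List.map_append]
          congr 1
          · refine List.map_congr_left ?_
            intro a ha
            have hak : a ≠ k := fun h => hko (h ▸ ha)
            rw [pvLast_append]
            have : (pvItemId it == a) = false := by
              rw [← hk]; exact beq_eq_false_iff_ne.2 fun h => hak h.symm
            rw [this]; rfl
          · simp [pvLast_append, hk]
        · -- count ≥ 2: overwrite in place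
          have hko : k ∈ pvDup ids := (h3 k).2 (by omega)
          have hcont : sA.2.contains k = true := hexcont.2 hko
          rw [if_neg hc, List.append_nil]
          show (sA.2.insert k it).items = _
          rw [PySem.Dict.items_insert_of_contains _ _ hcont, h5, List.map_map]
          refine List.map_congr_left ?_
          intro a _
          rcases eq_or_ne a k with hak | hak
          · subst hak
            simp only [Function.comp, beq_self_eq_true, if_true, pvLast_append, ← hk,
              beq_self_eq_true]
          · have hbeq : (a == k) = false := beq_eq_false_iff_ne.2 hak
            have hbeq' : (pvItemId it == a) = false := by
              rw [← hk]; exact beq_eq_false_iff_ne.2 fun h => hak h.symm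
            simp [Function.comp, hbeq, pvLast_append, hbeq']

-- ===== VERDICT (by name: the statement is the Claim_ definition above) =====
theorem get_duplicate_ids_spec : Claim_equal_get_duplicate_ids := by
  intro ds _ _
  show get_duplicate_ids ds = get_duplicate_ids_alt ds
  unfold get_duplicate_ids
  obtain ⟨_, _, h4, h5⟩ := pv_inv ds.flatten
  have halt : get_duplicate_ids_alt ds
      = ((pvDup ((ds.flatMap id).map pvItemId)).foldl
          (fun d k => d.insert k (pvLast (ds.flatMap id) k)) PySem.Dict.empty).items := rfl
  rw [halt, List.flatMap_id, ← List.foldl_flatten]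
  rw [PySem.Dict.items_foldl_insert_fresh _ (fun a => a) _ _
        (fun a _ => PySem.Dict.contains_empty a)
        (by rw [List.map_id']; exact h4)]
  simpa using h5
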